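-- pv_equiv track=rewrite | github.com/NikitaTolpikin/LanguageResearch | Code/v1/filter.py | rmat
-- ===== SOURCE A (Python) =====
-- def rmat(text):
-- 	i=0
-- 	while i<len(text):
-- 		if text[i]=='@':
-- 			endOfAtIndex = text.find(' ', i)
-- 			if endOfAtIndex == -1:
-- 				text = text[:i]
-- 			else:
-- 				text = text[:i]+text[endOfAtIndex:]
-- 		i+=1
-- 	return text
-- ===== SOURCE B (Python) =====
-- import re
--
-- def rmat(text):
-- 	# Delete each '@' together with the run of non-space characters after it.
-- 	return re.sub(r'@[^ ]*', '', text)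
-- ===== Notes on version B (the rewrite author's own statement) =====
-- stated objective: faster
-- what changed: A's index-walking loop that rebuilds the string by slicing at every @ is replaced by one regular-expression substitution (pattern @ followed by non-spaces, replaced by the empty string) done in a single pass.
import Mathlib
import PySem

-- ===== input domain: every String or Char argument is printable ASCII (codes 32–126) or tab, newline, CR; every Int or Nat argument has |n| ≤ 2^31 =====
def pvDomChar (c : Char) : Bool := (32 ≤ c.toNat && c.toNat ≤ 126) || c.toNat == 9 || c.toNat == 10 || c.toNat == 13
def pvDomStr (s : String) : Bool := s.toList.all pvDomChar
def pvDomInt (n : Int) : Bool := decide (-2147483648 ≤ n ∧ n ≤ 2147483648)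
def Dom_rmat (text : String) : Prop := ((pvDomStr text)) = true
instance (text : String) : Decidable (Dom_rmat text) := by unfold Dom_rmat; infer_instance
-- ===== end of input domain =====

-- B replaces A's index-walking loop over repeatedly re-sliced text by a single regex
-- substitution re.sub(r'@[^ ]*', '', text) (objective: idiomatic, one scanning pass).

-- ===== PORT A =====

-- A's while-loop; the fuel argument is only a totality guard: i grows by 1 every iteration
-- and the text never grows, so length+1 steps always reach i ≥ len(text) (proved below).
def rmatLoopF : Nat → List Char → Nat → List Char
  | 0, t, _ => t
  | f + 1, t, i =>
    if h : i < t.length then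
      if t[i] = '@' then
        -- endOfAtIndex = text.find(' ', i)
        if PySem.Chars.findFrom t [' '] (i : Int) none = -1 then
          rmatLoopF f (t.take i) (i + 1)                  -- text = text[:i]
        else
          -- text = text[:i] + text[endOfAtIndex:]
          rmatLoopF f (t.take i ++ t.drop (PySem.Chars.findFrom t [' '] (i : Int) none).toNat)
            (i + 1)
      else rmatLoopF f t (i + 1)
    else t

def rmat (text : String) : String :=
  String.ofList (rmatLoopF (text.toList.length + 1) text.toList 0)

-- ===== PORT B =====

-- hand port of re.sub(r'@[^ ]*', '', text), exact on all inputs: the substitution deletes each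
-- '@' together with the maximal run of non-space characters after it.  The fuel argument is
-- only a totality guard (the scanned list shrinks at every step, so length+1 always suffices).
def rmatScanF : Nat → List Char → List Char
  | 0, l => l
  | _ + 1, [] => []
  | f + 1, c :: rest =>
    if c = '@' then rmatScanF f (rest.dropWhile (· ≠ ' '))
    else c :: rmatScanF f rest

def rmat_alt (text : String) : String :=
  String.ofList (rmatScanF (text.toList.length + 1) text.toList)

-- ===== PRECONDITION & SPEC =====
def Spec_rmat (text : String) (out : String) : Prop := out = rmat_alt text
instance (text : String) (out : String) : Decidable (Spec_rmat text out) := by unfold Spec_rmat; infer_instance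

-- ===== CLAIM (what is proved, stated in full; the proofs are below) =====
def Claim_equal_rmat : Prop := ∀ (text : String), Dom_rmat text → Spec_rmat text (rmat text)

-- ===== LEMMAS AND PROOFS =====

theorem pv_drop_takeWhile (p : Char → Bool) (l : List Char) :
    l.drop (l.takeWhile p).length = l.dropWhile p := by
  induction l with
  | nil => simp
  | cons c rest ih =>
    by_cases hc : p c <;> simp [hc, ih]

theorem pv_dropWhile_space_cons (l : List Char) (h : ' ' ∈ l) :
    ∃ tl, l.dropWhile (· ≠ ' ') = ' ' :: tl := by
  induction l with
  | nil => cases h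
  | cons c rest ih =>
    by_cases hc : c = ' '
    · subst hc
      exact ⟨rest, by rw [List.dropWhile_cons, if_neg (by simp)]⟩
    · have hr : ' ' ∈ rest := by
        rcases List.mem_cons.mp h with h1 | h1
        · exact absurd h1.symm hc
        · exact h1
      obtain ⟨tl, htl⟩ := ih hr
      exact ⟨tl, by rw [List.dropWhile_cons, if_pos (by simp [hc]), htl]⟩

-- s.find(' ') = index of the first space (= length of the spaceless prefix), else -1
theorem pv_find_space (l : List Char) :
    PySem.Chars.find l [' '] =
      if ' ' ∈ l then (((l.takeWhile (· ≠ ' ')).length : Nat) : Int) else -1 := by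
  by_cases hm : ' ' ∈ l
  · rw [if_pos hm]
    have h0 : 0 ≤ PySem.Chars.find l [' '] :=
      (PySem.Chars.find_nonneg_iff l [' ']).mpr ((List.singleton_infix_iff ' ' l).mpr hm)
    obtain ⟨hpre, hmin⟩ := PySem.Chars.find_spec h0
    obtain ⟨tl, htl⟩ := pv_dropWhile_space_cons l hm
    have hprek : [' '] <+: l.drop (l.takeWhile (· ≠ ' ')).length := by
      rw [pv_drop_takeWhile, htl]; exact ⟨tl, rfl⟩
    have htwle : (l.takeWhile (· ≠ ' ')).length ≤ l.length :=
      (List.takeWhile_prefix _).length_le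
    have hfk : (PySem.Chars.find l [' ']).toNat ≤ (l.takeWhile (· ≠ ' ')).length := by
      by_contra hlt
      exact hmin _ (by omega) hprek
    have hkf : (l.takeWhile (· ≠ ' ')).length ≤ (PySem.Chars.find l [' ']).toNat := by
      by_contra hlt
      rw [not_le] at hlt
      obtain ⟨rest, hrest⟩ := hpre
      have hgf : l[(PySem.Chars.find l [' ']).toNat]? = some ' ' := by
        rw [← List.head?_drop, ← hrest]; rfl
      have hflen : (PySem.Chars.find l [' ']).toNat < l.length := by omega
      have hfl : l[(PySem.Chars.find l [' ']).toNat] = ' ' := by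
        rw [List.getElem?_eq_getElem hflen] at hgf
        exact Option.some.inj hgf
      have hgetw : (l.takeWhile (· ≠ ' '))[(PySem.Chars.find l [' ']).toNat]'(by omega)
          = l[(PySem.Chars.find l [' ']).toNat]'hflen :=
        (List.takeWhile_prefix _).getElem _
      have hmem : l[(PySem.Chars.find l [' ']).toNat]'hflen ∈ l.takeWhile (· ≠ ' ') := by
        rw [← hgetw]; exact List.getElem_mem _
      have := List.mem_takeWhile_imp hmem
      rw [hfl] at this
      simp at this
    omega
  · rw [if_neg hm]
    exact (PySem.Chars.find_eq_neg_one_iff l [' ']).mpr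
      (by rw [List.singleton_infix_iff]; exact hm)

-- s.find(' ', i) = first index ≥ i holding a space, else -1
theorem pvFindSpace_char (t : List Char) (i : Nat) (hi : i ≤ t.length) :
    PySem.Chars.findFrom t [' '] (i : Int) none =
      if ' ' ∈ t.drop i then (((i + ((t.drop i).takeWhile (· ≠ ' ')).length : Nat)) : Int)
      else -1 := by
  rw [PySem.Chars.findFrom_natCast t [' '] i hi, pv_find_space]
  by_cases hm : ' ' ∈ t.drop i
  · rw [if_pos hm, if_pos hm,
      if_neg (by omega : ¬ ((((t.drop i).takeWhile (· ≠ ' ')).length : Int) = -1))]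
    push_cast
    ring
  · simp [hm]

-- the scanner's result does not depend on the fuel once the fuel covers the list length
theorem rmatScanF_congr : ∀ (f g : Nat) (l : List Char),
    l.length ≤ f → l.length ≤ g → rmatScanF f l = rmatScanF g l := by
  intro f
  induction f with
  | zero =>
    intro g l hf hg
    have : l = [] := List.eq_nil_of_length_eq_zero (by omega)
    subst this
    cases g <;> simp [rmatScanF]
  | succ f ih =>
    intro g l hf hg
    cases g with
    | zero =>
      have : l = [] := List.eq_nil_of_length_eq_zero (by omega)
      subst this
      simp [rmatScanF]
    | succ g =>
      cases l with
      | nil => simp [rmatScanF]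
      | cons c rest =>
        simp only [rmatScanF]
        by_cases hc : c = '@'
        · rw [if_pos hc, if_pos hc]
          have hd := List.length_dropWhile_le (· ≠ ' ') rest
          simp only [List.length_cons] at hf hg
          exact ih g _ (by omega) (by omega)
        · rw [if_neg hc, if_neg hc]
          simp only [List.length_cons] at hf hg
          rw [ih g rest (by omega) (by omega)]

-- invariant: the loop from position i keeps text[:i] and acts as the scanner on text[i:]
theorem rmatLoopF_eq_scan : ∀ (f : Nat) (t : List Char) (i : Nat), t.length - i < f →
    rmatLoopF f t i = t.take i ++ rmatScanF ((t.drop i).length + 1) (t.drop i) := by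
  intro f
  induction f with
  | zero =>
    intro t i hn
    exact absurd hn (Nat.not_lt_zero _)
  | succ f ih =>
    intro t i hn
    rw [rmatLoopF]
    by_cases h : i < t.length
    · have hdi : t.drop i = t[i] :: t.drop (i + 1) := List.drop_eq_getElem_cons h
      rw [dif_pos h]
      by_cases hat : t[i] = '@'
      · rw [if_pos hat]
        by_cases hm : ' ' ∈ t.drop i
        · -- '@' at i, and a space occurs at or after i (hence strictly after i)
          have hm' : ' ' ∈ t.drop (i + 1) := by
            rw [hdi] at hm
            rcases List.mem_cons.mp hm with h1 | h1
            · exact absurd h1.symm (by simp [hat])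
            · exact h1
          obtain ⟨tl, htl⟩ := pv_dropWhile_space_cons (t.drop (i + 1)) hm'
          have htw : (t.drop i).takeWhile (· ≠ ' ')
              = t[i] :: ((t.drop (i + 1)).takeWhile (· ≠ ' ')) := by
            rw [hdi]; exact List.takeWhile_cons_of_pos (by simp [hat])
          have hF : PySem.Chars.findFrom t [' '] ((i : Int)) none
              = (((i + ((t.drop i).takeWhile (· ≠ ' ')).length : Nat)) : Int) := by
            rw [pvFindSpace_char t i (le_of_lt h), if_pos hm]
          have hKlen : ((t.drop i).takeWhile (· ≠ ' ')).length
              = ((t.drop (i + 1)).takeWhile (· ≠ ' ')).length + 1 := by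
            rw [htw, List.length_cons]
          have hdropK : t.drop (i + ((t.drop i).takeWhile (· ≠ ' ')).length) = ' ' :: tl := by
            rw [hKlen,
              show i + (((t.drop (i + 1)).takeWhile (· ≠ ' ')).length + 1)
                  = (i + 1) + ((t.drop (i + 1)).takeWhile (· ≠ ' ')).length from by omega,
              ← List.drop_drop, pv_drop_takeWhile, htl]
          have hcond : ¬ ((((i + ((t.drop i).takeWhile (· ≠ ' ')).length : Nat)) : Int) = -1) := by
            omega
          have hlen_take : (t.take i).length = i := by
            rw [List.length_take]; omega
          have htl_le : tl.length + 1 ≤ (t.drop (i + 1)).length := by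
            have := List.length_dropWhile_le (· ≠ ' ') (t.drop (i + 1))
            rw [htl] at this
            simpa using this
          simp only [hF, Int.toNat_natCast]
          rw [if_neg hcond, hdropK]
          rw [ih (t.take i ++ ' ' :: tl) (i + 1) (by
            rw [List.length_append, hlen_take]
            simp only [List.length_cons, List.length_drop] at htl_le ⊢
            omega)]
          rw [List.take_append, List.drop_append, hlen_take, List.take_take,
            min_eq_right (by omega : i ≤ i + 1),
            List.drop_of_length_le (by rw [hlen_take]; omega),
            show i + 1 - i = 1 from by omega]
          conv_rhs => rw [hdi]
          simp only [List.length_cons, rmatScanF]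
          rw [if_pos hat, htl]
          simp only [rmatScanF]
          rw [if_neg (by decide : ¬ (' ' = '@'))]
          rw [rmatScanF_congr ((t.drop (i + 1)).length) (tl.length + 1) tl
            (by omega) (by omega)]
          simp [List.append_assoc]
        · -- '@' at i and no space afterwards: the tail is cut off
          have hm' : ' ' ∉ t.drop (i + 1) := fun hx =>
            hm (hdi ▸ List.mem_cons_of_mem _ hx)
          have hdw : (t.drop (i + 1)).dropWhile (· ≠ ' ') = [] := by
            rw [List.dropWhile_eq_nil_iff]
            intro x hx
            simp only [decide_eq_true_eq]
            intro hxe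
            exact hm' (hxe ▸ hx)
          have hF : PySem.Chars.findFrom t [' '] ((i : Int)) none = -1 := by
            rw [pvFindSpace_char t i (le_of_lt h), if_neg hm]
          simp only [hF]
          rw [if_pos trivial]
          rw [ih (t.take i) (i + 1) (by rw [List.length_take]; omega)]
          rw [List.take_of_length_le (by rw [List.length_take]; omega),
            List.drop_of_length_le (by rw [List.length_take]; omega)]
          conv_rhs => rw [hdi]
          simp only [List.length_cons, rmatScanF]
          rw [if_pos hat, hdw]
          simp [rmatScanF]
      · -- ordinary character: kept, move on
        rw [if_neg hat]
        rw [ih t (i + 1) (by omega)]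
        conv_rhs => rw [hdi]
        simp only [List.length_cons, rmatScanF]
        rw [if_neg hat, List.take_add_one, List.getElem?_eq_getElem h]
        simp only [Option.toList_some, List.append_assoc, List.cons_append, List.nil_append]
    · rw [dif_neg h]
      have hle : t.length ≤ i := by omega
      simp [List.take_of_length_le hle, List.drop_of_length_le hle, rmatScanF]

-- ===== VERDICT (by name: the statement is the Claim_ definition above) =====
theorem rmat_spec : Claim_equal_rmat := by
  intro text _
  unfold Spec_rmat rmat rmat_alt
  rw [rmatLoopF_eq_scan (text.toList.length + 1) text.toList 0 (by omega)]
  simp
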